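-- pv_equiv track=rewrite | github.com/ckoons/BubbleSpacetimeTheory | play/toy_254_a5_nonspherical.py | _dim_D
-- ===== SOURCE A (Python) =====
-- def _dim_D(p, q, r):
--     """Type D_r: SO(2r), weight (p, q, 0, ..., 0)."""
--     lam = [0] * (r + 1)
--     lam[1] = p
--     lam[2] = q
--     l = [0] * (r + 1)
--     rho = [0] * (r + 1)
--     for i in range(1, r + 1):
--         rho[i] = r - i
--         l[i] = lam[i] + rho[i]
--     num = 1
--     den = 1
--     for i in range(1, r + 1):
--         for j in range(i + 1, r + 1):
--             num *= (l[i] * l[i] - l[j] * l[j])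
--             d = rho[i] * rho[i] - rho[j] * rho[j]
--             if d == 0:
--                 raise ValueError(f"Zero denom: rho[{i}]={rho[i]}, rho[{j}]={rho[j]}")
--             den *= d
--     return num // den
-- ===== SOURCE B (Python) =====
-- def _dim_D(p, q, r):
--     """Type D_r: SO(2r), weight (p, q, 0, ..., 0).
--
--     The Weyl ratio over pairs i<j with both i,j >= 3 cancels (there l_i equals
--     rho_i), so only pairs touching rows 1 and 2 are multiplied: O(r) not O(r^2).
--     """
--     l1 = p + r - 1
--     l2 = q + r - 2
--     r1 = r - 1
--     r2 = r - 2
--     num = l1 * l1 - l2 * l2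
--     den = r1 * r1 - r2 * r2
--     for j in range(3, r + 1):
--         c = (r - j) * (r - j)
--         num *= (l1 * l1 - c) * (l2 * l2 - c)
--         den *= (r1 * r1 - c) * (r2 * r2 - c)
--     return num // den
-- ===== Notes on version B (the rewrite author's own statement) =====
-- stated objective: faster
-- what changed: Instead of the double loop over all pairs i<j, B multiplies only the factors involving rows 1 and 2 in a single pass, since for i,j>=3 the numerator factor equals the denominator factor (l_i = rho_i) and cancels.
import Mathlib
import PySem

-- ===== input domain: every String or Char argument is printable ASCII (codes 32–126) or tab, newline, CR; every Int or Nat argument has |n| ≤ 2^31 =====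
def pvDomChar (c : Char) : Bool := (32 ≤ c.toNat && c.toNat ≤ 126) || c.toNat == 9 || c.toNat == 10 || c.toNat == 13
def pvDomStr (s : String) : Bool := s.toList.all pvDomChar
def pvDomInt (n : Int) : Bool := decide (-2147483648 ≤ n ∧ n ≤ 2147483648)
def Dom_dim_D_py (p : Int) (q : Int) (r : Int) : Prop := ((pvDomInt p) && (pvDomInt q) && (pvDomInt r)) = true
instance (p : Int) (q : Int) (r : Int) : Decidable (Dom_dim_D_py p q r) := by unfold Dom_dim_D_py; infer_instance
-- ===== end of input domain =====

-- B replaces A's double loop over all pairs i<j by a single O(r) pass over the pairs that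
-- touch rows 1 and 2 (for i,j ≥ 3 the numerator factor equals the denominator factor and cancels).

-- ===== PORT A =====
-- helper: the loop body 'rho[i] = r - i; l[i] = lam[i] + rho[i]'
def pvFillStep (lam : List Int) (r : Int) (st : List Int × List Int) (i : Int) : List Int × List Int :=
  (PySem.List.pySetD st.1 i (r - i),
   PySem.List.pySetD st.2 i
     (PySem.List.pyGetD lam i 0 + PySem.List.pyGetD (PySem.List.pySetD st.1 i (r - i)) i 0))

-- helper: the inner loop body; `none` marks the 'raise ValueError' branch (unreachable under Pre_)
def pvPairStep (rho l : List Int) (i : Int) (acc : Option (Int × Int)) (j : Int) : Option (Int × Int) :=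
  match acc with
  | none => none
  | some s =>
    let li := PySem.List.pyGetD l i 0
    let lj := PySem.List.pyGetD l j 0
    let num := s.1 * (li * li - lj * lj)
    let d := PySem.List.pyGetD rho i 0 * PySem.List.pyGetD rho i 0
             - PySem.List.pyGetD rho j 0 * PySem.List.pyGetD rho j 0
    if d = 0 then none else some (num, s.2 * d)

def dim_D_py (p : Int) (q : Int) (r : Int) : Int :=
  -- lam = [0]*(r+1); lam[1] = p; lam[2] = q   (Python raises IndexError when r < 2: excluded by Pre_)
  let lam : List Int := PySem.List.pySetD (PySem.List.pySetD (List.replicate (r + 1).toNat 0) 1 p) 2 q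
  -- for i in range(1, r+1): rho[i] = r - i; l[i] = lam[i] + rho[i]
  let st := (PySem.List.pyRange 1 (r + 1) 1).foldl (pvFillStep lam r)
      (List.replicate (r + 1).toNat 0, List.replicate (r + 1).toNat 0)
  -- num = den = 1; double loop over 1 ≤ i < j ≤ r
  let res := (PySem.List.pyRange 1 (r + 1) 1).foldl
      (fun acc i => (PySem.List.pyRange (i + 1) (r + 1) 1).foldl (pvPairStep st.1 st.2 i) acc)
      (some (1, 1))
  match res with
  | some s => PySem.Int.floordiv s.1 s.2
  | none => 0  -- Python raises ValueError here; never reached when 2 ≤ r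

-- ===== PORT B =====
def dim_D_py_alt (p : Int) (q : Int) (r : Int) : Int :=
  let l1 := p + r - 1
  let l2 := q + r - 2
  let r1 := r - 1
  let r2 := r - 2
  let nd := (PySem.List.pyRange 3 (r + 1) 1).foldl
      (fun (nd : Int × Int) j =>
        let c := (r - j) * (r - j)
        (nd.1 * ((l1 * l1 - c) * (l2 * l2 - c)),
         nd.2 * ((r1 * r1 - c) * (r2 * r2 - c))))
      (l1 * l1 - l2 * l2, r1 * r1 - r2 * r2)
  PySem.Int.floordiv nd.1 nd.2

-- ===== PRECONDITION & SPEC =====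
-- Python A raises IndexError (lam[1] / lam[2] on a list of length r+1 < 3) whenever r ≤ 1.
def Pre_dim_D_py (p : Int) (q : Int) (r : Int) : Prop := 2 ≤ r
instance (p : Int) (q : Int) (r : Int) : Decidable (Pre_dim_D_py p q r) := by unfold Pre_dim_D_py; infer_instance
def pvWitness_dim_D_py : Int × Int × Int := (1, 0, 3)

def Spec_dim_D_py (p : Int) (q : Int) (r : Int) (out : Int) : Prop := out = dim_D_py_alt p q r
instance (p : Int) (q : Int) (r : Int) (out : Int) : Decidable (Spec_dim_D_py p q r out) := by unfold Spec_dim_D_py; infer_instance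

-- ===== CLAIM (what is proved, stated in full; the proofs are below) =====
def Claim_equal_dim_D_py : Prop := ∀ (p : Int) (q : Int) (r : Int), Dom_dim_D_py p q r → Pre_dim_D_py p q r → Spec_dim_D_py p q r (dim_D_py p q r)

-- ===== LEMMAS AND PROOFS =====

-- abstract values of the arrays: l[i] and rho[i], and the pair factors
def pvLf (p q r i : Int) : Int := (if i = 1 then p else if i = 2 then q else 0) + (r - i)
def pvF (p q r i j : Int) : Int := pvLf p q r i * pvLf p q r i - pvLf p q r j * pvLf p q r j
def pvD (r i j : Int) : Int := (r - i) * (r - i) - (r - j) * (r - j)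
def pvN (p q r i : Int) : Int := ((PySem.List.pyRange (i + 1) (r + 1) 1).map (pvF p q r i)).prod
def pvDD (r i : Int) : Int := ((PySem.List.pyRange (i + 1) (r + 1) 1).map (pvD r i)).prod

-- the lam list, described elementwise
lemma pvLam_getD (p q r : Int) (hr : 2 ≤ r) (i : Int) (h1 : 1 ≤ i) (h2 : i ≤ r) :
    PySem.List.pyGetD (PySem.List.pySetD (PySem.List.pySetD (List.replicate (r + 1).toNat 0) 1 p) 2 q) i 0
      = (if i = 1 then p else if i = 2 then q else 0) := by
  have hn : (r + 1).toNat = (r - 2).toNat + 1 + 1 + 1 := by omega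
  rw [hn]
  simp only [List.replicate_succ]
  rw [PySem.List.pySetD_of_nonneg _ p (show (0:Int) ≤ 1 by norm_num),
      PySem.List.pySetD_of_nonneg _ q (show (0:Int) ≤ 2 by norm_num)]
  norm_num [List.set]
  rw [show i = ((i.toNat : Nat) : Int) by omega, PySem.List.pyGetD_natCast]
  rcases Nat.lt_or_ge i.toNat 3 with h | h
  · interval_cases h3 : i.toNat <;> simp_all
  · have hm : ∃ m, i.toNat = m + 3 := ⟨i.toNat - 3, by omega⟩
    obtain ⟨m, hmm⟩ := hm
    rw [hmm]
    simp [List.getD]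
    rw [if_neg (by omega), if_neg (by omega)]

-- the fill loop, elementwise
lemma pvFill_spec (r : Int) (lam : List Int) (hr : 2 ≤ r) : ∀ (k : Nat) (a : Int) (u v : List Int),
    a = r + 1 - k → 1 ≤ a → u.length = (r + 1).toNat → v.length = (r + 1).toNat →
    ((PySem.List.pyRange a (r + 1) 1).foldl (pvFillStep lam r) (u, v)).1.length = (r + 1).toNat ∧
    ((PySem.List.pyRange a (r + 1) 1).foldl (pvFillStep lam r) (u, v)).2.length = (r + 1).toNat ∧
    ∀ m : Nat, m < (r + 1).toNat →
      (((PySem.List.pyRange a (r + 1) 1).foldl (pvFillStep lam r) (u, v)).1.getD m 0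
          = if a ≤ (m : Int) then r - m else u.getD m 0) ∧
      (((PySem.List.pyRange a (r + 1) 1).foldl (pvFillStep lam r) (u, v)).2.getD m 0
          = if a ≤ (m : Int) then PySem.List.pyGetD lam (m : Int) 0 + (r - m) else v.getD m 0) := by
  intro k
  induction k with
  | zero =>
    intro a u v ha h1 hu hv
    rw [PySem.List.pyRange_one_eq_nil (by omega)]
    refine ⟨hu, hv, fun m hm => ?_⟩
    have : ¬ a ≤ (m : Int) := by omega
    simp [this]
  | succ k ih =>
    intro a u v ha h1 hu hv
    rw [PySem.List.pyRange_one_cons (by omega), List.foldl_cons]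
    have hb : a.toNat < u.length := by omega
    have hstep : pvFillStep lam r (u, v) a =
        (u.set a.toNat (r - a), v.set a.toNat (PySem.List.pyGetD lam a 0 + (r - a))) := by
      unfold pvFillStep
      rw [PySem.List.pySetD_of_nonneg u (r - a) (by omega),
          PySem.List.pySetD_of_nonneg v _ (by omega)]
      rw [show PySem.List.pyGetD (u.set a.toNat (r - a)) a 0 = r - a from by
            rw [PySem.List.pyGetD_eq_getElem _ _ (by omega) (by rw [List.length_set]; omega)]
            exact List.getElem_set_self _]
    rw [hstep]
    obtain ⟨hl1, hl2, hget⟩ := ih (a + 1) (u.set a.toNat (r - a))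
      (v.set a.toNat (PySem.List.pyGetD lam a 0 + (r - a)))
      (by omega) (by omega) (by rw [List.length_set]; omega) (by rw [List.length_set]; omega)
    refine ⟨hl1, hl2, fun m hm => ?_⟩
    obtain ⟨g1, g2⟩ := hget m hm
    constructor
    · rw [g1]
      rcases lt_trichotomy (m : Int) a with h | h | h
      · rw [if_neg (by omega), if_neg (by omega)]
        rw [List.getD_eq_getElem _ _ (by rw [List.length_set]; omega),
            List.getD_eq_getElem _ _ (by omega)]
        rw [List.getElem_set_ne (by omega)]
      · rw [if_neg (by omega), if_pos (by omega)]
        rw [List.getD_eq_getElem _ _ (by rw [List.length_set]; omega)]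
        rw [List.getElem_set, if_pos (by omega)]
        omega
      · rw [if_pos (by omega), if_pos (by omega)]
    · rw [g2]
      rcases lt_trichotomy (m : Int) a with h | h | h
      · rw [if_neg (by omega), if_neg (by omega)]
        rw [List.getD_eq_getElem _ _ (by rw [List.length_set]; omega),
            List.getD_eq_getElem _ _ (by omega)]
        rw [List.getElem_set_ne (by omega)]
      · rw [if_neg (by omega), if_pos (by omega)]
        rw [List.getD_eq_getElem _ _ (by rw [List.length_set]; omega)]
        rw [List.getElem_set, if_pos (by omega)]
        rw [show a = ((m : Int)) from by omega]
      · rw [if_pos (by omega), if_pos (by omega)]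

-- fold of the guarded pair step, when no denominator factor vanishes
lemma pvFoldGuard (g h : Int → Int) : ∀ (L : List Int) (a b : Int), (∀ x ∈ L, h x ≠ 0) →
    L.foldl (fun acc j => match acc with
      | none => none
      | some s => if h j = 0 then none else some (s.1 * g j, s.2 * h j)) (some (a, b))
      = some (a * (L.map g).prod, b * (L.map h).prod) := by
  intro L
  induction L with
  | nil => intro a b _; simp
  | cons x t ih =>
    intro a b hnz
    have hx : h x ≠ 0 := hnz x (by simp)
    simp only [List.foldl_cons, List.map_cons, List.prod_cons, hx, if_false]
    rw [ih _ _ (fun y hy => hnz y (by simp [hy]))]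
    simp [mul_assoc]

lemma pvFoldNone (f : Option (Int × Int) → Int → Option (Int × Int)) (hf : ∀ x, f none x = none) :
    ∀ (L : List Int), L.foldl f none = none := by
  intro L; induction L with
  | nil => rfl
  | cons x t ih => simpa [List.foldl_cons, hf x] using ih

-- fold of the unguarded pair-multiplication step (B's loop)
lemma pvFoldMul (g h : Int → Int) : ∀ (L : List Int) (a b : Int),
    L.foldl (fun (s : Int × Int) j => (s.1 * g j, s.2 * h j)) (a, b)
      = (a * (L.map g).prod, b * (L.map h).prod) := by
  intro L
  induction L with
  | nil => intro a b; simp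
  | cons x t ih =>
    intro a b
    simp only [List.foldl_cons, List.map_cons, List.prod_cons, ih]
    simp [mul_assoc]

-- the Option version of pvFoldMul (outer loop of A)
lemma pvFoldMulOpt (g h : Int → Int) : ∀ (L : List Int) (a b : Int),
    L.foldl (fun acc i => match acc with
      | none => none
      | some s => some (s.1 * g i, s.2 * h i)) (some (a, b))
      = some (a * (L.map g).prod, b * (L.map h).prod) := by
  intro L
  induction L with
  | nil => intro a b; simp
  | cons x t ih =>
    intro a b
    simp only [List.foldl_cons, List.map_cons, List.prod_cons, ih]
    simp [mul_assoc]

-- the denominator factors are positive for 1 ≤ i < j ≤ r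
lemma pvD_pos (r i j : Int) (h1 : 1 ≤ i) (h2 : i < j) (h3 : j ≤ r) : 0 < pvD r i j := by
  unfold pvD; nlinarith [sq_nonneg (r - i), sq_nonneg (r - j)]

lemma pvDD_pos (r i : Int) (h1 : 1 ≤ i) (h2 : i ≤ r) : 0 < pvDD r i := by
  unfold pvDD
  apply List.prod_pos
  intro x hx
  simp only [List.mem_map] at hx
  obtain ⟨j, hj, rfl⟩ := hx
  rw [PySem.List.mem_pyRange_one] at hj
  exact pvD_pos r i j h1 (by omega) (by omega)

-- pointwise product of two mapped lists
lemma pvProdMul (g h : Int → Int) : ∀ (L : List Int),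
    ((L.map (fun j => g j * h j)).prod) = (L.map g).prod * (L.map h).prod := by
  intro L
  induction L with
  | nil => simp
  | cons x t ih => simp [ih]; ring

-- A's value, in closed form
lemma pvA_closed (p q r : Int) (hr : 2 ≤ r) :
    dim_D_py p q r =
      PySem.Int.floordiv (((PySem.List.pyRange 1 (r + 1) 1).map (pvN p q r)).prod)
                         (((PySem.List.pyRange 1 (r + 1) 1).map (pvDD r)).prod) := by
  simp only [dim_D_py]
  set lam : List Int :=
    PySem.List.pySetD (PySem.List.pySetD (List.replicate (r + 1).toNat 0) 1 p) 2 q with hlam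
  have hlamlen : lam.length = (r + 1).toNat := by
    rw [hlam, PySem.List.pySetD_of_nonneg _ q (by norm_num),
        PySem.List.pySetD_of_nonneg _ p (by norm_num)]
    simp
  obtain ⟨hL1, hL2, hget⟩ := pvFill_spec r lam hr r.toNat 1
    (List.replicate (r + 1).toNat 0) (List.replicate (r + 1).toNat 0)
    (by omega) (by omega) (by simp) (by simp)
  set st := (PySem.List.pyRange 1 (r + 1) 1).foldl (pvFillStep lam r)
    (List.replicate (r + 1).toNat 0, List.replicate (r + 1).toNat 0) with hst
  have hrho : ∀ i : Int, 1 ≤ i → i ≤ r → PySem.List.pyGetD st.1 i 0 = r - i := by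
    intro i hi1 hi2
    rw [show i = ((i.toNat : Nat) : Int) by omega, PySem.List.pyGetD_natCast]
    obtain ⟨g1, _⟩ := hget i.toNat (by omega)
    rw [g1, if_pos (by omega)]
  have hlv : ∀ i : Int, 1 ≤ i → i ≤ r → PySem.List.pyGetD st.2 i 0 = pvLf p q r i := by
    intro i hi1 hi2
    rw [show i = ((i.toNat : Nat) : Int) by omega, PySem.List.pyGetD_natCast]
    obtain ⟨_, g2⟩ := hget i.toNat (by omega)
    rw [g2, if_pos (by omega)]
    rw [show (((i.toNat : Nat)) : Int) = i by omega]
    rw [pvLam_getD p q r hr i hi1 hi2]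
    rfl
  -- replace the inner fold by its closed value, outer step by pure pair multiplication
  have houter : ∀ (acc : Option (Int × Int)) (i : Int), i ∈ PySem.List.pyRange 1 (r + 1) 1 →
      (PySem.List.pyRange (i + 1) (r + 1) 1).foldl (pvPairStep st.1 st.2 i) acc
        = (fun acc i => match acc with
            | none => none
            | some s => some (s.1 * pvN p q r i, s.2 * pvDD r i)) acc i := by
    intro acc i hi
    rw [PySem.List.mem_pyRange_one] at hi
    cases acc with
    | none => exact pvFoldNone _ (fun x => rfl) _
    | some s =>
      have hpair : ∀ (acc : Option (Int × Int)) (j : Int), j ∈ PySem.List.pyRange (i + 1) (r + 1) 1 →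
          pvPairStep st.1 st.2 i acc j
            = (fun acc j => match acc with
                | none => none
                | some s => if pvD r i j = 0 then none
                    else some (s.1 * pvF p q r i j, s.2 * pvD r i j)) acc j := by
        intro acc j hj
        rw [PySem.List.mem_pyRange_one] at hj
        cases acc with
        | none => rfl
        | some t =>
          simp only [pvPairStep]
          rw [hlv i hi.1 (by omega), hlv j (by omega) (by omega),
              hrho i hi.1 (by omega), hrho j (by omega) (by omega)]
          rfl
      rw [PySem.List.foldl_congr_mem _ _ _ _ hpair]
      rw [show (some s : Option (Int × Int)) = some (s.1, s.2) from by rw [Prod.mk.eta]]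
      rw [pvFoldGuard (pvF p q r i) (pvD r i) _ s.1 s.2 (fun j hj => by
        rw [PySem.List.mem_pyRange_one] at hj
        exact (pvD_pos r i j hi.1 (by omega) (by omega)).ne')]
      rfl
  rw [PySem.List.foldl_congr_mem _ _ _ _ houter]
  rw [pvFoldMulOpt (pvN p q r) (pvDD r) _ 1 1]
  simp only [one_mul]

-- B's value, in closed form
lemma pvB_closed (p q r : Int) :
    dim_D_py_alt p q r =
      PySem.Int.floordiv
        (pvF p q r 1 2 * ((PySem.List.pyRange 3 (r + 1) 1).map (fun j => pvF p q r 1 j * pvF p q r 2 j)).prod)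
        (pvD r 1 2 * ((PySem.List.pyRange 3 (r + 1) 1).map (fun j => pvD r 1 j * pvD r 2 j)).prod) := by
  simp only [dim_D_py_alt]
  rw [pvFoldMul (fun j => ((p + r - 1) * (p + r - 1) - (r - j) * (r - j)) *
                          ((q + r - 2) * (q + r - 2) - (r - j) * (r - j)))
                (fun j => ((r - 1) * (r - 1) - (r - j) * (r - j)) *
                          ((r - 2) * (r - 2) - (r - j) * (r - j)))]
  have h12 : pvF p q r 1 2 = (p + r - 1) * (p + r - 1) - (q + r - 2) * (q + r - 2) := by
    simp [pvF, pvLf]; ring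
  have hd12 : pvD r 1 2 = (r - 1) * (r - 1) - (r - 2) * (r - 2) := by
    simp [pvD]
  have hmapF : (PySem.List.pyRange 3 (r + 1) 1).map (fun j => pvF p q r 1 j * pvF p q r 2 j)
      = (PySem.List.pyRange 3 (r + 1) 1).map (fun j =>
          ((p + r - 1) * (p + r - 1) - (r - j) * (r - j)) *
          ((q + r - 2) * (q + r - 2) - (r - j) * (r - j))) := by
    apply List.map_congr_left
    intro j hj
    rw [PySem.List.mem_pyRange_one] at hj
    simp [pvF, pvLf, show j ≠ 1 by omega, show j ≠ 2 by omega]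
    ring
  have hmapD : (PySem.List.pyRange 3 (r + 1) 1).map (fun j => pvD r 1 j * pvD r 2 j)
      = (PySem.List.pyRange 3 (r + 1) 1).map (fun j =>
          ((r - 1) * (r - 1) - (r - j) * (r - j)) *
          ((r - 2) * (r - 2) - (r - j) * (r - j))) := by
    apply List.map_congr_left
    intro j hj
    simp [pvD]
  rw [h12, hd12, hmapF, hmapD]

-- the ratio of the full pair products equals B's ratio times a common positive factor
lemma pvMain (p q r : Int) (hr : 2 ≤ r) : dim_D_py p q r = dim_D_py_alt p q r := by
  rw [pvA_closed p q r hr, pvB_closed p q r]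
  have hsplit : PySem.List.pyRange 1 (r + 1) 1
      = 1 :: 2 :: PySem.List.pyRange 3 (r + 1) 1 := by
    rw [PySem.List.pyRange_one_cons (by omega), PySem.List.pyRange_one_cons (by omega)]
    norm_num
  -- for i ≥ 3, the numerator block equals the denominator block
  have hNeqD : ∀ i ∈ PySem.List.pyRange 3 (r + 1) 1, pvN p q r i = pvDD r i := by
    intro i hi
    rw [PySem.List.mem_pyRange_one] at hi
    unfold pvN pvDD
    congr 1
    apply List.map_congr_left
    intro j hj
    rw [PySem.List.mem_pyRange_one] at hj
    simp [pvF, pvD, pvLf, show i ≠ 1 by omega, show i ≠ 2 by omega,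
          show j ≠ 1 by omega, show j ≠ 2 by omega]
  have hmapN : (PySem.List.pyRange 3 (r + 1) 1).map (pvN p q r)
      = (PySem.List.pyRange 3 (r + 1) 1).map (pvDD r) := List.map_congr_left hNeqD
  set C := ((PySem.List.pyRange 3 (r + 1) 1).map (pvDD r)).prod with hC
  have hCpos : 0 < C := by
    rw [hC]
    apply List.prod_pos
    intro x hx
    simp only [List.mem_map] at hx
    obtain ⟨i, hi, rfl⟩ := hx
    rw [PySem.List.mem_pyRange_one] at hi
    exact pvDD_pos r i (by omega) (by omega)
  -- split pvN 1 and pvDD 1 at j = 2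
  have hsplit2 : PySem.List.pyRange 2 (r + 1) 1 = 2 :: PySem.List.pyRange 3 (r + 1) 1 := by
    rw [PySem.List.pyRange_one_cons (by omega)]
    norm_num
  have hN1 : pvN p q r 1 = pvF p q r 1 2 * ((PySem.List.pyRange 3 (r + 1) 1).map (pvF p q r 1)).prod := by
    unfold pvN
    norm_num [hsplit2]
  have hD1 : pvDD r 1 = pvD r 1 2 * ((PySem.List.pyRange 3 (r + 1) 1).map (pvD r 1)).prod := by
    unfold pvDD
    norm_num [hsplit2]
  have hN2 : pvN p q r 2 = ((PySem.List.pyRange 3 (r + 1) 1).map (pvF p q r 2)).prod := by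
    unfold pvN; norm_num
  have hD2 : pvDD r 2 = ((PySem.List.pyRange 3 (r + 1) 1).map (pvD r 2)).prod := by
    unfold pvDD; norm_num
  rw [hsplit]
  simp only [List.map_cons, List.prod_cons, hmapN]
  rw [hN1, hD1, hN2, hD2, pvProdMul (pvF p q r 1) (pvF p q r 2), pvProdMul (pvD r 1) (pvD r 2)]
  rw [show pvF p q r 1 2 * ((PySem.List.pyRange 3 (r + 1) 1).map (pvF p q r 1)).prod *
        (((PySem.List.pyRange 3 (r + 1) 1).map (pvF p q r 2)).prod * C)
      = (pvF p q r 1 2 * (((PySem.List.pyRange 3 (r + 1) 1).map (pvF p q r 1)).prod *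
        ((PySem.List.pyRange 3 (r + 1) 1).map (pvF p q r 2)).prod)) * C from by ring]
  rw [show pvD r 1 2 * ((PySem.List.pyRange 3 (r + 1) 1).map (pvD r 1)).prod *
        (((PySem.List.pyRange 3 (r + 1) 1).map (pvD r 2)).prod * C)
      = (pvD r 1 2 * (((PySem.List.pyRange 3 (r + 1) 1).map (pvD r 1)).prod *
        ((PySem.List.pyRange 3 (r + 1) 1).map (pvD r 2)).prod)) * C from by ring]
  show Int.fdiv _ _ = Int.fdiv _ _
  rw [mul_comm _ C, mul_comm _ C]
  exact Int.mul_fdiv_mul_of_pos _ _ hCpos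

-- ===== VERDICT (by name: the statement is the Claim_ definition above) =====
theorem dim_D_py_spec : Claim_equal_dim_D_py := by
  intro p q r _ hpre
  unfold Spec_dim_D_py
  exact pvMain p q r hpre
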